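-- pv_equiv track=rewrite | github.com/erezbz/COSMOS-English-to-Spanish-Translator | name_placeholder_utils.py | insert_placeholders_for_inference
-- ===== SOURCE A (Python) =====
-- from typing import Tuple, Dict, List
--
-- def insert_placeholders_for_inference(text: str) -> Tuple[str, Dict[str, str]]:
--     """
--     For inference: Replace entities with __ENTX__ placeholders.
--
--     This is ONLY used at inference time to mark where names are.
--     The model will translate around these placeholders.
--
--     Args:
--         text: User input sentence
--
--     Returns:
--         (text_with_placeholders, entity_map)
--
--     Example:
--         "Hello Bob and Alice"
--         -> ("Hello __ENT0__ and __ENT1__",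
--             {"__ENT0__": "Bob", "__ENT1__": "Alice"})
--     """
--     words = text.split()
--     result_words = []
--     entity_map = {}
--     entity_count = 0
--
--     # Common words that are capitalized but aren't names
--     # Expanded list of common non-name words
--     common_words = {
--         'I', 'The', 'A', 'An', 'This', 'That', 'These', 'Those',
--         'Hello', 'Hi', 'Hey', 'Yes', 'No', 'Please', 'Thanks',
--         'My', 'Your', 'His', 'Her', 'Their', 'Our', 'Its'
--     }
--
--     i = 0
--     while i < len(words):
--         word = words[i]
--         clean_word = word.rstrip('.,!?;:')
--
--         # Check if capitalized (potential entity)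
--         if clean_word and clean_word[0].isupper():
--             # Skip common words that aren't names
--             if clean_word in common_words:
--                 result_words.append(word)
--                 i += 1
--                 continue
--
--             # Check for multi-word entity first (e.g., "New York")
--             # Look ahead for consecutive capitalized words
--             entity_parts = [word]
--             j = i + 1
--
--             while j < len(words):
--                 next_word = words[j]
--                 next_clean = next_word.rstrip('.,!?;:')
--                 if next_clean and next_clean[0].isupper() and next_clean not in common_words:
--                     entity_parts.append(next_word)
--                     j += 1
--                 else:
--                     break
--
--             # If we found a multi-word entity OR a likely single-word name
--             is_sentence_start = (i == 0)
--             is_likely_name = len(clean_word) > 1 and clean_word not in common_words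
--
--             # Treat as entity if:
--             # 1. Multi-word (e.g., "New York")
--             # 2. Not sentence start
--             # 3. Sentence start but clearly a name (2+ chars, not common word)
--             if len(entity_parts) > 1 or not is_sentence_start or is_likely_name:
--                 entity = " ".join(entity_parts)
--                 placeholder = f"__ent{entity_count}__"
--                 entity_map[placeholder] = entity
--                 result_words.append(placeholder)
--                 entity_count += 1
--                 i = j
--                 continue
--
--         result_words.append(word)
--         i += 1
--
--     return " ".join(result_words), entity_map
-- ===== SOURCE B (Python) =====
-- COMMON_WORDS = {
--     'I', 'The', 'A', 'An', 'This', 'That', 'These', 'Those',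
--     'Hello', 'Hi', 'Hey', 'Yes', 'No', 'Please', 'Thanks',
--     'My', 'Your', 'His', 'Her', 'Their', 'Our', 'Its'
-- }
--
-- def _is_candidate(word):
--     clean = word.rstrip('.,!?;:')
--     return bool(clean) and clean[0].isupper() and clean not in COMMON_WORDS
--
-- def _runs(words):
--     """Partition words into maximal runs of equal candidate-flag (recursive)."""
--     if not words:
--         return []
--     flag = _is_candidate(words[0])
--     k = 1
--     while k < len(words) and _is_candidate(words[k]) == flag:
--         k += 1
--     return [(flag, words[:k])] + _runs(words[k:])
--
-- def insert_placeholders_for_inference(text):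
--     words = text.split()
--     out = []
--     entity_map = {}
--     count = 0
--     pos = 0
--     for flag, run in _runs(words):
--         if flag and (len(run) > 1 or pos > 0
--                      or len(run[0].rstrip('.,!?;:')) > 1):
--             placeholder = f"__ent{count}__"
--             entity_map[placeholder] = " ".join(run)
--             out.append(placeholder)
--             count += 1
--         else:
--             out.extend(run)
--         pos += len(run)
--     return " ".join(out), entity_map
-- ===== Notes on version B (the rewrite author's own statement) =====
-- stated objective: alternative
-- what changed: A's single index-driven while-loop with an inner lookahead scan is replaced by a two-phase run-partition: words are first grouped (recursively) into maximal runs of equal candidate-flag, then one pass over the runs emits each non-candidate run verbatim and each candidate run as a placeholder (or verbatim for a rejected single short sentence-start candidate), tracking the run's absolute start index.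
import Mathlib
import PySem

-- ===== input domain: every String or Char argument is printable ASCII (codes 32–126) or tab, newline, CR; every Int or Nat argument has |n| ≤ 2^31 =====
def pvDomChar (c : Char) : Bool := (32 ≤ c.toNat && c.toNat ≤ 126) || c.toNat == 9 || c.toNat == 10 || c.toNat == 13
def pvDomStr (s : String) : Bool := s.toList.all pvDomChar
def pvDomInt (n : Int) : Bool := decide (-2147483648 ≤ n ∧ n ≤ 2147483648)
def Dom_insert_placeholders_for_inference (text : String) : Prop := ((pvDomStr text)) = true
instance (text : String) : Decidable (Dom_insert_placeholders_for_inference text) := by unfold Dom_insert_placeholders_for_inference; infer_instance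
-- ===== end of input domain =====

-- B replaces A's index-driven scan-with-lookahead by a run-partition (group words into
-- maximal candidate/non-candidate runs, then emit per run); objective: alternative decomposition.

-- shared literal constants of the Python module
def pvPunct : List Char := ['.', ',', '!', '?', ';', ':']
def pvCommon : List String :=
  ["I", "The", "A", "An", "This", "That", "These", "Those",
   "Hello", "Hi", "Hey", "Yes", "No", "Please", "Thanks",
   "My", "Your", "His", "Her", "Their", "Our", "Its"]
-- word.rstrip('.,!?;:') — hand port (exact: drops exactly the trailing chars of that set)
def pvRstrip (w : String) : String := String.ofList ((w.toList.reverse.dropWhile (· ∈ pvPunct)).reverse)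

-- ===== PORT A =====
-- the inner `while j < len(words): …` lookahead: collect consecutive capitalized non-common words
def pvLookaheadA : List String → List String × List String
  | [] => ([], [])
  | w :: ws =>
    let nc := pvRstrip w
    if !nc.toList.isEmpty && PySem.Chars.isupper (nc.toList.headD ' ') && !(pvCommon.contains nc) then
      let p := pvLookaheadA ws
      (w :: p.1, p.2)
    else ([], w :: ws)

lemma pvLookaheadA_snd_le : ∀ ws : List String, (pvLookaheadA ws).2.length ≤ ws.length := by
  intro ws
  induction ws with
  | nil => simp [pvLookaheadA]
  | cons w ws ih =>
    simp only [pvLookaheadA]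
    split
    · exact Nat.le_succ_of_le ih
    · simp

-- the outer `while i < len(words)` loop; `pos` is the absolute index i, `rem` = words[i:]
def pvLoopA : List String → Nat → List String → PySem.Dict String String → Int →
    List String × PySem.Dict String String
  | [], _, res, emap, _ => (res, emap)
  | w :: rest, pos, res, emap, cnt =>
    let clean := pvRstrip w
    if !clean.toList.isEmpty && PySem.Chars.isupper (clean.toList.headD ' ') then
      if pvCommon.contains clean then
        pvLoopA rest (pos + 1) (res ++ [w]) emap cnt
      else
        let la := pvLookaheadA rest
        let parts := w :: la.1
        let is_sentence_start := decide (pos = 0)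
        let is_likely_name := decide (clean.toList.length > 1) && !(pvCommon.contains clean)
        if decide (parts.length > 1) || !is_sentence_start || is_likely_name then
          let entity := PySem.Str.join " " parts
          let ph := "__ent" ++ PySem.Int.toStr cnt ++ "__"
          pvLoopA la.2 (pos + parts.length) (res ++ [ph]) (emap.insert ph entity) (cnt + 1)
        else
          pvLoopA rest (pos + 1) (res ++ [w]) emap cnt
    else
      pvLoopA rest (pos + 1) (res ++ [w]) emap cnt
  termination_by rem _ _ _ _ => rem.length
  decreasing_by
  · simp
  · have := pvLookaheadA_snd_le rest; simp; omega
  · simp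
  · simp

def insert_placeholders_for_inference (text : String) : String × (List (String × String)) :=
  let words := PySem.Str.split₀ text
  let r := pvLoopA words 0 [] PySem.Dict.empty 0
  (PySem.Str.join " " r.1, r.2.items)

-- ===== PORT B =====
def pvIsCand (w : String) : Bool :=
  let clean := pvRstrip w
  !clean.toList.isEmpty && PySem.Chars.isupper (clean.toList.headD ' ') && !(pvCommon.contains clean)

-- _runs: partition into maximal runs of equal candidate-flag
def pvRunsB : List String → List (Bool × List String)
  | [] => []
  | w :: ws =>
    let f := pvIsCand w
    (f, w :: ws.takeWhile (fun x => pvIsCand x == f)) ::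
      pvRunsB (ws.dropWhile (fun x => pvIsCand x == f))
  termination_by ws => ws.length
  decreasing_by
  · have := List.length_dropWhile_le (fun x => pvIsCand x == pvIsCand w) ws
    simp; omega

-- the `for flag, run in _runs(words)` loop
def pvGoB : List (Bool × List String) → Nat → List String → PySem.Dict String String → Int →
    List String × PySem.Dict String String
  | [], _, res, emap, _ => (res, emap)
  | (f, run) :: rs, pos, res, emap, cnt =>
    if f && (decide (run.length > 1) || decide (pos > 0) ||
             decide ((pvRstrip (run.headD "")).toList.length > 1)) then
      let ph := "__ent" ++ PySem.Int.toStr cnt ++ "__"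
      pvGoB rs (pos + run.length) (res ++ [ph]) (emap.insert ph (PySem.Str.join " " run)) (cnt + 1)
    else
      pvGoB rs (pos + run.length) (res ++ run) emap cnt

def insert_placeholders_for_inference_alt (text : String) : String × (List (String × String)) :=
  let words := PySem.Str.split₀ text
  let r := pvGoB (pvRunsB words) 0 [] PySem.Dict.empty 0
  (PySem.Str.join " " r.1, r.2.items)

-- ===== PRECONDITION & SPEC =====
def Spec_insert_placeholders_for_inference (text : String) (out : String × (List (String × String))) : Prop := out = insert_placeholders_for_inference_alt text
instance (text : String) (out : String × (List (String × String))) : Decidable (Spec_insert_placeholders_for_inference text out) := by unfold Spec_insert_placeholders_for_inference; infer_instance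

-- ===== CLAIM (what is proved, stated in full; the proofs are below) =====
def Claim_equal_insert_placeholders_for_inference : Prop := ∀ (text : String), Dom_insert_placeholders_for_inference text → Spec_insert_placeholders_for_inference text (insert_placeholders_for_inference text)

-- ===== LEMMAS AND PROOFS =====

lemma pvLookaheadA_cons (w : String) (ws : List String) :
    pvLookaheadA (w :: ws) =
      if pvIsCand w then ((w :: (pvLookaheadA ws).1, (pvLookaheadA ws).2)) else ([], w :: ws) := rfl

lemma pvLookaheadA_eq (ws : List String) :
    pvLookaheadA ws = (ws.takeWhile pvIsCand, ws.dropWhile pvIsCand) := by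
  induction ws with
  | nil => rfl
  | cons w ws ih =>
    rw [pvLookaheadA_cons]
    cases h : pvIsCand w <;>
      simp [h, ih]

lemma takeWhile_nil_dropWhile {p : String → Bool} {l : List String}
    (h : l.takeWhile p = []) : l.dropWhile p = l := by
  cases l with
  | nil => rfl
  | cons a l =>
    cases hp : p a
    · simp [hp]
    · simp [hp] at h

lemma pred_beq_true : (fun x => pvIsCand x == true) = pvIsCand := by
  funext x; cases pvIsCand x <;> rfl

lemma pred_beq_false : (fun x => pvIsCand x == false) = (fun x => !pvIsCand x) := by
  funext x; cases pvIsCand x <;> rfl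

lemma pvRunsB_cons (w : String) (ws : List String) :
    pvRunsB (w :: ws) =
      (pvIsCand w, w :: ws.takeWhile (fun x => pvIsCand x == pvIsCand w)) ::
        pvRunsB (ws.dropWhile (fun x => pvIsCand x == pvIsCand w)) := by
  rw [pvRunsB]

lemma pvLoopA_cons (w : String) (rest : List String) (pos : Nat) (res : List String)
    (emap : PySem.Dict String String) (cnt : Int) :
    pvLoopA (w :: rest) pos res emap cnt =
      (let clean := pvRstrip w
       if !clean.toList.isEmpty && PySem.Chars.isupper (clean.toList.headD ' ') then
         if pvCommon.contains clean then
           pvLoopA rest (pos + 1) (res ++ [w]) emap cnt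
         else
           let la := pvLookaheadA rest
           let parts := w :: la.1
           if decide (parts.length > 1) || !(decide (pos = 0)) ||
              (decide (clean.toList.length > 1) && !(pvCommon.contains clean)) then
             pvLoopA la.2 (pos + parts.length) (res ++ ["__ent" ++ PySem.Int.toStr cnt ++ "__"])
               (emap.insert ("__ent" ++ PySem.Int.toStr cnt ++ "__") (PySem.Str.join " " parts)) (cnt + 1)
           else
             pvLoopA rest (pos + 1) (res ++ [w]) emap cnt
       else
         pvLoopA rest (pos + 1) (res ++ [w]) emap cnt) := by
  rw [pvLoopA]

lemma pvGoB_cons_false {w : String} {ws : List String} (hf : pvIsCand w = false)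
    (pos : Nat) (res : List String) (emap : PySem.Dict String String) (cnt : Int) :
    pvGoB (pvRunsB (w :: ws)) pos res emap cnt =
      pvGoB (pvRunsB ws) (pos + 1) (res ++ [w]) emap cnt := by
  rw [pvRunsB_cons, hf, pred_beq_false]
  cases ws with
  | nil => simp [pvGoB, pvRunsB]
  | cons x xs =>
    cases hx : pvIsCand x
    · rw [pvRunsB_cons, hx, pred_beq_false]
      simp only [pvGoB, List.takeWhile_cons, List.dropWhile_cons, hx, Bool.not_false,
        if_true, Bool.false_and, Bool.false_eq_true, if_false]
      congr 1
      · simp only [List.length_cons]; omega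
      · simp
    · simp only [pvGoB, List.takeWhile_cons, List.dropWhile_cons, hx, Bool.not_true,
        Bool.false_eq_true, if_false, Bool.false_and]
      congr 1

lemma pvLoopA_cons_skip {w : String} (hf : pvIsCand w = false) (ws : List String)
    (pos : Nat) (res : List String) (emap : PySem.Dict String String) (cnt : Int) :
    pvLoopA (w :: ws) pos res emap cnt = pvLoopA ws (pos + 1) (res ++ [w]) emap cnt := by
  cases hb1 : (!(pvRstrip w).toList.isEmpty &&
      PySem.Chars.isupper ((pvRstrip w).toList.headD ' '))
  · rw [pvLoopA_cons]
    simp only [hb1, Bool.false_eq_true, if_false]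
  · have hb2 : pvCommon.contains (pvRstrip w) = true := by
      unfold pvIsCand at hf
      simp only [hb1, Bool.true_and, Bool.not_eq_false'] at hf
      exact hf
    rw [pvLoopA_cons]
    simp only [hb1, hb2, if_true]

lemma pvLoopA_eq_pvGoB : ∀ (words : List String) (pos : Nat) (res : List String)
    (emap : PySem.Dict String String) (cnt : Int),
    pvLoopA words pos res emap cnt = pvGoB (pvRunsB words) pos res emap cnt := by
  have H : ∀ (n : Nat) (words : List String), words.length ≤ n →
      ∀ (pos : Nat) (res : List String) (emap : PySem.Dict String String) (cnt : Int),
      pvLoopA words pos res emap cnt = pvGoB (pvRunsB words) pos res emap cnt := by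
    intro n
    induction n with
    | zero =>
      intro words h pos res emap cnt
      have : words = [] := List.eq_nil_of_length_eq_zero (Nat.le_zero.mp h)
      subst this
      rw [pvLoopA, pvRunsB]
      rfl
    | succ n ih =>
      intro words h pos res emap cnt
      cases words with
      | nil => rw [pvLoopA, pvRunsB]; rfl
      | cons w ws =>
        have hlen : ws.length ≤ n := by simpa using h
        cases hf : pvIsCand w
        · -- non-candidate word: A appends it and moves on; B's run machinery does the same
          rw [pvGoB_cons_false hf, pvLoopA_cons_skip hf]
          exact ih ws hlen _ _ _ _
        · -- candidate word: A consumes the lookahead run, B the candidate run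
          have hf' := hf
          rw [show pvIsCand w = ((!(pvRstrip w).toList.isEmpty &&
              PySem.Chars.isupper ((pvRstrip w).toList.headD ' ')) &&
              !(pvCommon.contains (pvRstrip w))) from rfl] at hf'
          obtain ⟨hb1, hnc'⟩ := (Bool.and_eq_true _ _).mp hf'
          have hnc : pvCommon.contains (pvRstrip w) = false := by simpa using hnc'
          rw [pvLoopA_cons, pvRunsB_cons, hf, pred_beq_true]
          simp only [hb1, hnc, if_true, Bool.false_eq_true, if_false, Bool.not_false,
            Bool.and_true]
          rw [pvLookaheadA_eq]
          simp only [pvGoB]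
          have hhead : ((w :: ws.takeWhile pvIsCand).headD "") = w := rfl
          rw [hhead]
          have hcond : (decide ((w :: ws.takeWhile pvIsCand).length > 1) || !decide (pos = 0) ||
              decide ((pvRstrip w).toList.length > 1)) =
              (true && (decide ((w :: ws.takeWhile pvIsCand).length > 1) || decide (pos > 0) ||
               decide ((pvRstrip w).toList.length > 1))) := by
            have : (!decide (pos = 0)) = decide (pos > 0) := by cases pos <;> simp
            rw [Bool.true_and, this]
          rw [hcond]
          cases hc : (true && (decide ((w :: ws.takeWhile pvIsCand).length > 1) ||
              decide (pos > 0) || decide ((pvRstrip w).toList.length > 1)))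
          · -- rejected: a single short candidate at sentence start is kept verbatim
            simp only [Bool.false_eq_true, if_false]
            have hl1 : ¬ ((w :: ws.takeWhile pvIsCand).length > 1) := by
              intro hgt
              simp only [Bool.true_and, Bool.or_eq_false_iff, decide_eq_false_iff_not] at hc
              exact hc.1.1 hgt
            have htw : ws.takeWhile pvIsCand = [] := by
              cases htww : ws.takeWhile pvIsCand with
              | nil => rfl
              | cons a l => rw [htww] at hl1; simp at hl1
            rw [htw, takeWhile_nil_dropWhile htw]
            simp only [List.length_cons, List.length_nil, Nat.zero_add]
            exact ih ws hlen (pos + 1) (res ++ [w]) emap cnt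
          · simp only [if_true]
            have hlend : (ws.dropWhile pvIsCand).length ≤ n :=
              le_trans (List.length_dropWhile_le _ _) hlen
            exact ih _ hlend _ _ _ _
  intro words pos res emap cnt
  exact H words.length words le_rfl pos res emap cnt

-- ===== VERDICT (by name: the statement is the Claim_ definition above) =====
theorem insert_placeholders_for_inference_spec : Claim_equal_insert_placeholders_for_inference := by
  intro text _
  unfold Spec_insert_placeholders_for_inference
  unfold insert_placeholders_for_inference insert_placeholders_for_inference_alt
  simp only [pvLoopA_eq_pvGoB]
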